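-- pv_equiv track=rewrite | github.com/hardwarestorecat/vehicle_monitor | src/signal-api/handler.py | check_for_session_error
-- ===== SOURCE A (Python) =====
-- def check_for_session_error(stderr: str, stdout: str) -> bool:
--     """Check if error indicates session expiry"""
--     session_error_patterns = [
--         'not registered',
--         'registration required',
--         'Authorization failed',
--         'Invalid credentials',
--         'Account not found',
--         '401 Unauthorized',
--         '403 Forbidden'
--     ]
--
--     error_text = (stderr + stdout).lower()
--     for pattern in session_error_patterns:
--         if pattern.lower() in error_text:
--             return True
--     return False
-- ===== SOURCE B (Python) =====
-- import re
--
-- _SESSION_ERROR_RE = re.compile(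
--     '|'.join(re.escape(p) for p in [
--         'not registered',
--         'registration required',
--         'Authorization failed',
--         'Invalid credentials',
--         'Account not found',
--         '401 Unauthorized',
--         '403 Forbidden',
--     ]),
--     re.IGNORECASE,
-- )
--
--
-- def check_for_session_error(stderr: str, stdout: str) -> bool:
--     """Check if error indicates session expiry"""
--     return bool(_SESSION_ERROR_RE.search(stderr + stdout))
-- ===== Notes on version B (the rewrite author's own statement) =====
-- stated objective: idiomatic
-- what changed: Replaces the explicit loop of seven separate case-lowered substring scans with one precompiled case-insensitive alternation regex searched once over the combined text.
import Mathlib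
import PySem

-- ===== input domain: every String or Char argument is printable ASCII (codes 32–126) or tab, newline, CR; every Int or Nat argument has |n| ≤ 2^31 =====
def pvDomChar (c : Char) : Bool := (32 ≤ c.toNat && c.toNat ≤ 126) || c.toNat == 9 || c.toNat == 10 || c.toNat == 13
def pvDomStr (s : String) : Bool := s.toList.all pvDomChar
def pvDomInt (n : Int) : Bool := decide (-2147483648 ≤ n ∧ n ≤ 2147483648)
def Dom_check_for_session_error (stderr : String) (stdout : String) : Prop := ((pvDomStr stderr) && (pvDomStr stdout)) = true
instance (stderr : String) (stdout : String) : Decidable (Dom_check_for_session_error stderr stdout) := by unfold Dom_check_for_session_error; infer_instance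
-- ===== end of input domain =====

-- B replaces A's loop of seven separate lowered substring scans with one precompiled
-- case-insensitive alternation regex searched once over the combined text (idiomatic).

-- ===== PORT A =====
def pvPatternsA : List String :=
  ["not registered", "registration required", "Authorization failed",
   "Invalid credentials", "Account not found", "401 Unauthorized", "403 Forbidden"]

-- the for-loop with early `return True`
def pvLoopA : List String → List Char → Bool
  | [], _ => false
  | p :: ps, text =>
    if PySem.Chars.isIn (PySem.Chars.lower p.toList) text then true else pvLoopA ps text

def check_for_session_error (stderr : String) (stdout : String) : Bool :=
  pvLoopA pvPatternsA (PySem.Chars.lower (stderr.toList ++ stdout.toList))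

-- ===== PORT B =====
-- the escaped literal alternatives of the compiled regex, lowered once (IGNORECASE over
-- ASCII text compares via lower; exact on the ASCII domain)
def pvPatternsB : List (List Char) :=
  (["not registered", "registration required", "Authorization failed",
    "Invalid credentials", "Account not found", "401 Unauthorized", "403 Forbidden"] : List String).map
    (fun p => PySem.Chars.lower p.toList)

-- bool(pat.search(stderr + stdout)): the regex engine scans offsets left to right and at
-- each offset tries the alternatives in order; search is truthy iff some offset matches.
-- Ported by hand (no regex primitive in PySem); exact for escaped-literal alternation.
def check_for_session_error_alt (stderr : String) (stdout : String) : Bool :=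
  let text := PySem.Chars.lower (stderr.toList ++ stdout.toList)
  (List.range text.length).any
    (fun i => pvPatternsB.any (fun p => PySem.Chars.startswith (text.drop i) p))

-- ===== PRECONDITION & SPEC =====
def Spec_check_for_session_error (stderr : String) (stdout : String) (out : Bool) : Prop := out = check_for_session_error_alt stderr stdout
instance (stderr : String) (stdout : String) (out : Bool) : Decidable (Spec_check_for_session_error stderr stdout out) := by unfold Spec_check_for_session_error; infer_instance

-- ===== CLAIM =====
def Claim_equal_check_for_session_error : Prop := ∀ (stderr : String) (stdout : String), Dom_check_for_session_error stderr stdout → Spec_check_for_session_error stderr stdout (check_for_session_error stderr stdout)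

-- ===== LEMMAS AND PROOFS =====

-- A's early-return loop is an existential over the pattern list
theorem pvLoopA_eq_true_iff (ps : List String) (text : List Char) :
    pvLoopA ps text = true ↔ ∃ p ∈ ps, PySem.Chars.isIn (PySem.Chars.lower p.toList) text = true := by
  induction ps with
  | nil => simp [pvLoopA]
  | cons p ps ih =>
    simp only [pvLoopA]
    split_ifs with h
    · simp [h]
    · simp [ih, h]

-- for a nonempty pattern, a prefix of some drop forces the offset below the length
theorem pvSweep_iff (p text : List Char) (hp : p ≠ []) :
    (∃ i ∈ List.range text.length, PySem.Chars.startswith (text.drop i) p = true)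
      ↔ PySem.Chars.isIn p text = true := by
  rw [← PySem.Chars.exists_prefix_drop_iff_isIn]
  constructor
  · rintro ⟨i, _, hi⟩
    exact ⟨i, (PySem.Chars.startswith_iff _ _).mp hi⟩
  · rintro ⟨j, hj⟩
    by_cases hjl : j < text.length
    · exact ⟨j, List.mem_range.mpr hjl, (PySem.Chars.startswith_iff _ _).mpr hj⟩
    · exfalso
      have : text.drop j = [] := List.drop_eq_nil_of_le (by omega)
      rw [this] at hj
      exact hp (List.prefix_nil.mp hj)

theorem pvAllNonempty : ∀ p ∈ pvPatternsB, p ≠ [] := by decide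

theorem pvMain (text : List Char) :
    pvLoopA pvPatternsA text
      = (List.range text.length).any
          (fun i => pvPatternsB.any (fun p => PySem.Chars.startswith (text.drop i) p)) := by
  have hBA : pvPatternsB = pvPatternsA.map (fun p => PySem.Chars.lower p.toList) := rfl
  rw [Bool.eq_iff_iff, pvLoopA_eq_true_iff]
  simp only [List.any_eq_true]
  constructor
  · rintro ⟨p, hp, hin⟩
    obtain ⟨i, hi, hs⟩ := (pvSweep_iff _ text
      (pvAllNonempty _ (by rw [hBA]; exact List.mem_map_of_mem hp))).mpr hin
    exact ⟨i, hi, PySem.Chars.lower p.toList, by rw [hBA]; exact List.mem_map_of_mem hp, hs⟩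
  · rintro ⟨i, hi, q, hq, hs⟩
    obtain ⟨p, hp, rfl⟩ := by rw [hBA] at hq; exact List.mem_map.mp hq
    exact ⟨p, hp, (pvSweep_iff _ text (pvAllNonempty _ hq)).mp ⟨i, hi, hs⟩⟩

-- ===== VERDICT =====
theorem check_for_session_error_spec : Claim_equal_check_for_session_error := by
  intro stderr stdout _
  unfold Spec_check_for_session_error check_for_session_error check_for_session_error_alt
  exact pvMain _
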